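-- pv_equiv track=rewrite | github.com/koka-land/py_base | ! kompege/ЕГЭ/Задания/t_23/473.py | f
-- ===== SOURCE A (Python) =====
-- def f(start, finish):
--     if start == finish:
--         return 1
--     elif start >= finish:
--         return 0
--     elif start == 43:
--         return 0
--     else:
--         return f(start + 2, finish) + f(start + (start + 1), finish) + f(start + (start - 1), finish)
-- ===== SOURCE B (Python) =====
-- def f(start, finish):
--     # Bottom-up DP over values: ways[v] = number of move sequences from v to finish.
--     if start >= finish:
--         return 1 if start == finish else 0
--     ways = {finish: 1}
--     v = finish - 1
--     while v >= start:
--         if v == 43: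
--             ways[v] = 0
--         else:
--             ways[v] = ways.get(v + 2, 0) + ways.get(2 * v + 1, 0) + ways.get(2 * v - 1, 0)
--         v -= 1
--     return ways[start]
-- ===== Notes on version B (the rewrite author's own statement) =====
-- stated objective: faster
-- what changed: Replaced the exponential triple-branch recursion by a bottom-up dynamic program that fills a dict of counts from finish down to start, visiting each value once.
import Mathlib
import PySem

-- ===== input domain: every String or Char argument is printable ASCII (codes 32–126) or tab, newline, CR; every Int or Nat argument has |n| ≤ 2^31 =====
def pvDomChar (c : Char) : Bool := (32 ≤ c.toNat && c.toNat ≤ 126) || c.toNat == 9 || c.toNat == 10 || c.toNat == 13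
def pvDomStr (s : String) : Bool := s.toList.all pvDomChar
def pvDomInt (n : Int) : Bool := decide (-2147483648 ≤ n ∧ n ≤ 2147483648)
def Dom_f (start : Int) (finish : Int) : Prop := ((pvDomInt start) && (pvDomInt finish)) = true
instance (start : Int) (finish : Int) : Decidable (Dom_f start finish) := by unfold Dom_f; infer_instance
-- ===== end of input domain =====

-- B replaces A's exponential triple recursion by a bottom-up DP dict from finish down to start (asymptotically faster).

-- ===== PORT A =====
-- fuel-guarded transliteration of A's recursion; for inputs in Pre_f the fuel
-- (finish - start).toNat + 1 strictly dominates the recursion depth measure, so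
-- the 0-fuel branch is never reached there.
def fAux : Nat → Int → Int → Int
  | 0, _, _ => 0
  | n+1, s, fin =>
    if s = fin then 1
    else if s ≥ fin then 0
    else if s = 43 then 0
    else fAux n (s + 2) fin + fAux n (s + (s + 1)) fin + fAux n (s + (s - 1)) fin

def f (start : Int) (finish : Int) : Int := fAux ((finish - start).toNat + 1) start finish

-- ===== PORT B =====
-- loop body of Source B's while loop; fuel = number of iterations (finish - start).toNat
def fAltLoop : Nat → Int → Int → PySem.Dict Int Int → PySem.Dict Int Int
  | 0, _, _, d => d
  | n+1, v, fin, d =>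
    let d' := if v = 43 then d.insert v 0
              else d.insert v (d.getD (v + 2) 0 + d.getD (2 * v + 1) 0 + d.getD (2 * v - 1) 0)
    fAltLoop n (v - 1) fin d'

def f_alt (start : Int) (finish : Int) : Int :=
  if start ≥ finish then (if start = finish then 1 else 0)
  else
    let d := (PySem.Dict.empty).insert finish (1 : Int)
    -- ways[start] : the key is always present after the loop; getD is exact here
    (fAltLoop ((finish - start).toNat) (finish - 1) finish d).getD start 0

-- ===== PRECONDITION & SPEC =====
-- Pre_f excludes exactly the inputs where A never returns: for start < 2 with
-- start < finish the branch start + (start - 1) does not move towards finish and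
-- Python recurses forever (RecursionError).
def Pre_f (start : Int) (finish : Int) : Prop := 2 ≤ start ∨ finish ≤ start
instance (start : Int) (finish : Int) : Decidable (Pre_f start finish) := by unfold Pre_f; infer_instance
def pvWitness_f : Int × Int := (2, 12)

def Spec_f (start : Int) (finish : Int) (out : Int) : Prop := out = f_alt start finish
instance (start : Int) (finish : Int) (out : Int) : Decidable (Spec_f start finish out) := by unfold Spec_f; infer_instance

-- ===== CLAIM (what is proved, stated in full; the proofs are below) =====
def Claim_equal_f : Prop := ∀ (start : Int) (finish : Int), Dom_f start finish → Pre_f start finish → Spec_f start finish (f start finish)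

-- ===== LEMMAS AND PROOFS =====

-- fuel irrelevance of A's port on the terminating region
theorem fAux_stable (fin : Int) : ∀ (n : Nat), ∀ (s : Int) (m : Nat),
    (2 ≤ s ∨ fin ≤ s) → (fin - s).toNat < n → (fin - s).toNat < m →
    fAux n s fin = fAux m s fin := by
  intro n
  induction n with
  | zero => intro s m _ h _; omega
  | succ n ih =>
    intro s m hs hn hm
    obtain ⟨m', rfl⟩ : ∃ m', m = m' + 1 := ⟨m - 1, by omega⟩
    simp only [fAux]
    split_ifs with h1 h2 h3
    · rfl
    · rfl
    · rfl
    · -- recursive case: s < fin, so 2 ≤ s; all successors ≥ s+1 keep 2 ≤ ·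
      have hsf : s < fin := by omega
      have hs2 : 2 ≤ s := by rcases hs with h | h; exact h; omega
      have k1 : (fin - (s + 2)).toNat < n ∧ (fin - (s + 2)).toNat < m' := by omega
      have k2 : (fin - (s + (s + 1))).toNat < n ∧ (fin - (s + (s + 1))).toNat < m' := by omega
      have k3 : (fin - (s + (s - 1))).toNat < n ∧ (fin - (s + (s - 1))).toNat < m' := by omega
      rw [ih (s + 2) m' (Or.inl (by omega)) k1.1 k1.2,
          ih (s + (s + 1)) m' (Or.inl (by omega)) k2.1 k2.2,
          ih (s + (s - 1)) m' (Or.inl (by omega)) k3.1 k3.2]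

theorem f_of_ge (s fin : Int) (h : fin ≤ s) : f s fin = if s = fin then 1 else 0 := by
  have : (fin - s).toNat = 0 := by omega
  simp only [f, this, fAux]
  split_ifs <;> omega

-- the recurrence of A's port on the terminating region
theorem f_rec (s fin : Int) (h2 : 2 ≤ s) (hlt : s < fin) (h43 : s ≠ 43) :
    f s fin = f (s + 2) fin + f (s + (s + 1)) fin + f (s + (s - 1)) fin := by
  simp only [f]
  have hne : s ≠ fin := by omega
  have hge : ¬ s ≥ fin := by omega
  conv_lhs => rw [fAux]
  simp only [hne, hge, h43, if_false]
  rw [fAux_stable fin ((fin - s).toNat) (s + 2) ((fin - (s + 2)).toNat + 1)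
        (Or.inl (by omega)) (by omega) (by omega),
      fAux_stable fin ((fin - s).toNat) (s + (s + 1)) ((fin - (s + (s + 1))).toNat + 1)
        (Or.inl (by omega)) (by omega) (by omega),
      fAux_stable fin ((fin - s).toNat) (s + (s - 1)) ((fin - (s + (s - 1))).toNat + 1)
        (Or.inl (by omega)) (by omega) (by omega)]

theorem f_43 (fin : Int) (h : (43 : Int) < fin) : f 43 fin = 0 := by
  simp only [f, fAux]
  norm_num [show ¬ (43 : Int) = fin by omega, show ¬ (43 : Int) ≥ fin by omega]

-- loop invariant for B's port: processing n values v, v-1, …, v-n+1 extends a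
-- dict that tabulates f on (v, fin] to one tabulating f on (v-n, fin]
theorem fAltLoop_inv (fin : Int) : ∀ (n : Nat), ∀ (v : Int) (d : PySem.Dict Int Int),
    v < fin → 2 ≤ v - (n : Int) + 1 →
    (∀ u : Int, d.get? u = if v < u ∧ u ≤ fin then some (f u fin) else none) →
    (∀ u : Int, (fAltLoop n v fin d).get? u =
      if v - (n : Int) < u ∧ u ≤ fin then some (f u fin) else none) := by
  intro n
  induction n with
  | zero => intro v d _ _ hd u; simpa using hd u
  | succ n ih =>
    intro v d hv h2 hd u
    have hv2 : 2 ≤ v := by omega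
    have getD_eq : ∀ w : Int, v < w → d.getD w 0 = f w fin := by
      intro w hw
      rw [PySem.Dict.getD_eq_get?_getD, hd w]
      by_cases hwf : w ≤ fin
      · simp [hw, hwf]
      · simp [hwf]
        rw [f_of_ge w fin (by omega)]
        simp [show w ≠ fin by omega]
    have hval : (if v = 43 then d.insert v 0
        else d.insert v (d.getD (v + 2) 0 + d.getD (2 * v + 1) 0 + d.getD (2 * v - 1) 0))
        = d.insert v (f v fin) := by
      by_cases h43 : v = 43
      · subst h43
        rw [f_43 fin (by omega)]
        simp
      · rw [if_neg h43, getD_eq (v + 2) (by omega), getD_eq (2 * v + 1) (by omega),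
            getD_eq (2 * v - 1) (by omega), f_rec v fin hv2 hv h43]
        ring_nf
    simp only [fAltLoop, hval]
    have := ih (v - 1) (d.insert v (f v fin)) (by omega) (by omega)
      (fun u => by
        rw [PySem.Dict.get?_insert, hd u]
        split_ifs with he <;> simp_all <;> omega) u
    rw [this, show v - 1 - (n : Int) = v - ((n + 1 : Nat) : Int) by push_cast; ring]

-- ===== VERDICT (by name: the statement is the Claim_ definition above) =====
theorem f_spec : Claim_equal_f := by
  intro start finish _ hpre
  unfold Spec_f f_alt
  by_cases hge : start ≥ finish
  · rw [if_pos hge, f_of_ge start finish hge]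
  · rw [if_neg hge]
    have h2 : 2 ≤ start := by rcases hpre with h | h; exact h; omega
    have hlt : start < finish := by omega
    have key := fAltLoop_inv finish ((finish - start).toNat) (finish - 1)
      ((PySem.Dict.empty).insert finish (1 : Int)) (by omega) (by omega)
      (fun u => by
        rw [PySem.Dict.get?_insert, PySem.Dict.get?_empty]
        by_cases he : u = finish
        · rw [he, if_pos rfl, if_pos ⟨by omega, le_rfl⟩, f_of_ge finish finish le_rfl]
          simp
        · rw [if_neg he, if_neg (by omega)]) start
    rw [PySem.Dict.getD_eq_get?_getD, key]
    have : finish - 1 - ((finish - start).toNat : Int) < start ∧ start ≤ finish := by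
      omega
    simp [this]
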